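-- pv_equiv track=rewrite | github.com/alejandrobolivar/CompuII-1-2025 | parcial1/scripts/00_horarios.py | secciones_por_catedra
-- ===== SOURCE A (Python) =====
-- def secciones_por_catedra(lst_datos):
--     """Calcula la cantidad de secciones por cátedra por departamento"""
--     dic_resultado = {}
--     for registro in lst_datos:
--         dept = registro['departamento']
--         asignatura = registro['asignatura']
--         if dept not in dic_resultado:
--             dic_resultado[dept] = {}
--         dic_resultado[dept][asignatura] = dic_resultado[dept].get(asignatura, 0) + 1
--     return dic_resultado
-- ===== SOURCE B (Python) =====
-- def _conteo(asignaturas):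
--     """Second pass: count occurrences of each asignatura in a plain list."""
--     conteo = {}
--     for asig in asignaturas:
--         conteo[asig] = conteo.get(asig, 0) + 1
--     return conteo
--
--
-- def secciones_por_catedra(lst_datos):
--     """Calcula la cantidad de secciones por cátedra por departamento"""
--     # pass 1: group the asignaturas of each department into a list
--     grupos = {}
--     for registro in lst_datos:
--         grupos.setdefault(registro['departamento'], []).append(registro['asignatura'])
--     # pass 2: turn each group into a subject -> count dict
--     return {dept: _conteo(asigs) for dept, asigs in grupos.items()}
-- ===== Notes on version B (the rewrite author's own statement) =====
-- stated objective: alternative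
-- what changed: B separates the work into two distinct passes - first grouping each department's asignaturas into a list, then a dict comprehension counting each group - instead of A's single interleaved pass that accumulates nested counts.
-- outside the precondition, e.g. on secciones_por_catedra([{'departamento': 'M'}]): A raises KeyError, B raises KeyError
import Mathlib
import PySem

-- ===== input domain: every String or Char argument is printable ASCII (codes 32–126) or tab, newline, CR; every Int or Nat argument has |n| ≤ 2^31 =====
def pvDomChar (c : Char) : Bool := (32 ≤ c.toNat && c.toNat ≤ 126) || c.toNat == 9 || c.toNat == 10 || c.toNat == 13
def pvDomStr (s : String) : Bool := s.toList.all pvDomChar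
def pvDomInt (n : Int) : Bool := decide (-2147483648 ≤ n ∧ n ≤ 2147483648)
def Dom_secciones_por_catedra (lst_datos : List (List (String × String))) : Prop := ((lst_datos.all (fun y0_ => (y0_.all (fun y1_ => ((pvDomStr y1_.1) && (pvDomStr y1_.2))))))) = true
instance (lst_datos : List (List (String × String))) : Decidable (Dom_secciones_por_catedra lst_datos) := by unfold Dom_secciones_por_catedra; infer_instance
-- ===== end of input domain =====

-- B changes the decomposition: one pass grouping asignaturas per department, then a
-- second pass counting each group — instead of A's single interleaved nested-count pass.

-- ===== PORT A =====
-- registro[k] in Python raises KeyError when k is absent; Pre_ excludes that, so getD "" is exact on Pre_.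
def pvKey (registro : List (String × String)) (k : String) : String :=
  ((PySem.Dict.ofList registro).get? k).getD ""

def secciones_por_catedra (lst_datos : List (List (String × String))) : List (String × List (String × Int)) :=
  let dic_resultado := lst_datos.foldl (fun dic registro =>
      let dept := pvKey registro "departamento"
      let asignatura := pvKey registro "asignatura"
      let dic := if dic.contains dept then dic else dic.insert dept PySem.Dict.empty
      let inner := dic.getD dept PySem.Dict.empty
      dic.insert dept (inner.insert asignatura (inner.getD asignatura 0 + 1)))
    (PySem.Dict.empty : PySem.Dict String (PySem.Dict String Int))
  dic_resultado.items.map (fun p => (p.1, p.2.items))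

-- ===== PORT B =====
def conteoB (asignaturas : List String) : PySem.Dict String Int :=
  asignaturas.foldl (fun conteo asig => conteo.insert asig (conteo.getD asig 0 + 1)) PySem.Dict.empty

def secciones_por_catedra_alt (lst_datos : List (List (String × String))) : List (String × List (String × Int)) :=
  let grupos := lst_datos.foldl (fun grupos registro =>
      let g := grupos.setdefault (pvKey registro "departamento") []
      g.insert (pvKey registro "departamento")
        (g.getD (pvKey registro "departamento") [] ++ [pvKey registro "asignatura"]))
    (PySem.Dict.empty : PySem.Dict String (List String))
  grupos.items.map (fun p => (p.1, (conteoB p.2).items))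

-- ===== PRECONDITION & SPEC =====
-- Pre_ excludes exactly the records missing a 'departamento' or 'asignatura' key, on which Python A raises KeyError.
def Pre_secciones_por_catedra (lst_datos : List (List (String × String))) : Prop :=
  ∀ r ∈ lst_datos, "departamento" ∈ r.map Prod.fst ∧ "asignatura" ∈ r.map Prod.fst
instance (lst_datos : List (List (String × String))) : Decidable (Pre_secciones_por_catedra lst_datos) := by unfold Pre_secciones_por_catedra; infer_instance
def pvWitness_secciones_por_catedra : (List (List (String × String))) :=
  [[("departamento", "Matematica"), ("asignatura", "Algebra")]]

def Spec_secciones_por_catedra (lst_datos : List (List (String × String))) (out : List (String × List (String × Int))) : Prop := out = secciones_por_catedra_alt lst_datos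
instance (lst_datos : List (List (String × String))) (out : List (String × List (String × Int))) : Decidable (Spec_secciones_por_catedra lst_datos out) := by unfold Spec_secciones_por_catedra; infer_instance

-- ===== CLAIM (what is proved, stated in full; the proofs are below) =====
def Claim_equal_secciones_por_catedra : Prop := ∀ (lst_datos : List (List (String × String))), Dom_secciones_por_catedra lst_datos → Pre_secciones_por_catedra lst_datos → Spec_secciones_por_catedra lst_datos (secciones_por_catedra lst_datos)

-- ===== LEMMAS AND PROOFS =====

-- abbreviations for the two loop bodies
def stepA (dic : PySem.Dict String (PySem.Dict String Int)) (registro : List (String × String)) :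
    PySem.Dict String (PySem.Dict String Int) :=
  let dept := pvKey registro "departamento"
  let asignatura := pvKey registro "asignatura"
  let dic := if dic.contains dept then dic else dic.insert dept PySem.Dict.empty
  let inner := dic.getD dept PySem.Dict.empty
  dic.insert dept (inner.insert asignatura (inner.getD asignatura 0 + 1))

def stepB (grupos : PySem.Dict String (List String)) (registro : List (String × String)) :
    PySem.Dict String (List String) :=
  let g := grupos.setdefault (pvKey registro "departamento") []
  g.insert (pvKey registro "departamento")
    (g.getD (pvKey registro "departamento") [] ++ [pvKey registro "asignatura"])

-- the simulation map: a grouping dict mapped to the nested-count dict A maintains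
def Dmap (g : PySem.Dict String (List String)) : PySem.Dict String (PySem.Dict String Int) :=
  PySem.Dict.mk (g.items.map (fun p => (p.1, conteoB p.2)))

theorem keys_Dmap (g : PySem.Dict String (List String)) : (Dmap g).keys = g.keys := by
  simp [Dmap, PySem.Dict.keys, List.map_map, Function.comp]

theorem contains_Dmap (g : PySem.Dict String (List String)) (k : String) :
    (Dmap g).contains k = g.contains k := by
  simp [PySem.Dict.contains_eq_decide_mem_keys, keys_Dmap]

theorem conteoB_append (l : List String) (a : String) :
    conteoB (l ++ [a]) = (conteoB l).insert a ((conteoB l).getD a 0 + 1) := by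
  simp [conteoB, List.foldl_append]

theorem Dmap_insert (g : PySem.Dict String (List String)) (k : String) (v : List String) :
    Dmap (g.insert k v) = (Dmap g).insert k (conteoB v) := by
  apply PySem.Dict.ext
  by_cases h : g.contains k = true
  · have h' : (Dmap g).contains k = true := by rw [contains_Dmap]; exact h
    have e1 : (Dmap (g.insert k v)).items = ((g.insert k v).items).map (fun p => (p.1, conteoB p.2)) := rfl
    rw [e1, PySem.Dict.items_insert_of_contains _ _ h, PySem.Dict.items_insert_of_contains _ _ h']
    show (g.items.map _).map _ = ((g.items.map _).map _ : List _)
    simp only [List.map_map]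
    refine List.map_congr_left ?_
    intro p _
    by_cases hp : p.1 == k <;> simp [Function.comp, hp]
  · have h1 : g.contains k = false := by simpa using h
    have h' : (Dmap g).contains k = false := by rw [contains_Dmap]; exact h1
    have e1 : (Dmap (g.insert k v)).items = ((g.insert k v).items).map (fun p => (p.1, conteoB p.2)) := rfl
    rw [e1, PySem.Dict.items_insert_of_not_contains _ _ h1, PySem.Dict.items_insert_of_not_contains _ _ h']
    simp [Dmap]

theorem step_comm (g : PySem.Dict String (List String)) (hn : g.keys.Nodup)
    (registro : List (String × String)) :
    stepA (Dmap g) registro = Dmap (stepB g registro) := by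
  set dept := pvKey registro "departamento" with hdept
  set asig := pvKey registro "asignatura" with hasig
  by_cases h : g.contains dept = true
  · -- existing department: A updates the inner dict, B appends to the list
    have h' : (Dmap g).contains dept = true := by rw [contains_Dmap]; exact h
    obtain ⟨l, hl⟩ : ∃ l, g.get? dept = some l := by
      rcases hget : g.get? dept with _ | l
      · rw [PySem.Dict.contains_eq_isSome_get?, hget] at h; simp at h
      · exact ⟨l, rfl⟩
    have hlmem : (dept, l) ∈ g.items := PySem.Dict.mem_items_of_get?_eq_some _ hl
    have hgd : g.getD dept [] = l := PySem.Dict.getD_of_get?_eq_some _ _ hl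
    have hmemD : (dept, conteoB l) ∈ (Dmap g).items := by
      simp only [Dmap]
      exact List.mem_map.mpr ⟨(dept, l), hlmem, rfl⟩
    have hnd : (Dmap g).keys.Nodup := by rw [keys_Dmap]; exact hn
    have hinner : (Dmap g).getD dept PySem.Dict.empty = conteoB l :=
      PySem.Dict.getD_of_mem_items _ hmemD hnd _
    have hsd : g.setdefault dept [] = g := PySem.Dict.setdefault_of_contains _ _ (by exact h)
    show stepA (Dmap g) registro = Dmap (stepB g registro)
    rw [stepA, stepB]
    simp only [← hdept, ← hasig, h', hsd, if_true, hinner, hgd]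
    rw [Dmap_insert, conteoB_append]
  · -- fresh department: both sides append a new entry
    have h1 : g.contains dept = false := by simpa using h
    have h' : (Dmap g).contains dept = false := by rw [contains_Dmap]; exact h1
    have hsd : g.setdefault dept [] = g.insert dept [] :=
      PySem.Dict.setdefault_of_not_contains _ _ (by exact h1)
    rw [stepA, stepB]
    simp only [← hdept, ← hasig, h', hsd, Bool.false_eq_true, if_false,
      PySem.Dict.getD_insert_self, PySem.Dict.insert_insert_self, List.nil_append]
    rw [Dmap_insert]
    rfl

theorem nodup_stepB (g : PySem.Dict String (List String)) (hn : g.keys.Nodup)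
    (registro : List (String × String)) : (stepB g registro).keys.Nodup := by
  rw [stepB]
  apply PySem.Dict.nodup_keys_insert
  by_cases h : g.contains (pvKey registro "departamento") = true
  · rw [PySem.Dict.setdefault_of_contains _ _ (by exact h)]; exact hn
  · rw [PySem.Dict.setdefault_of_not_contains _ _ (by simpa using h)]
    exact PySem.Dict.nodup_keys_insert _ _ _ hn

theorem fold_comm (lst : List (List (String × String))) :
    ∀ (g : PySem.Dict String (List String)), g.keys.Nodup →
      lst.foldl stepA (Dmap g) = Dmap (lst.foldl stepB g) := by
  induction lst with
  | nil => intro g _; rfl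
  | cons r rest ih =>
    intro g hn
    simp only [List.foldl_cons]
    rw [step_comm g hn r]
    exact ih _ (nodup_stepB g hn r)

-- ===== VERDICT (by name: the statement is the Claim_ definition above) =====
theorem secciones_por_catedra_spec : Claim_equal_secciones_por_catedra := by
  intro lst_datos _ _
  show secciones_por_catedra lst_datos = secciones_por_catedra_alt lst_datos
  rw [secciones_por_catedra, secciones_por_catedra_alt]
  have hA : lst_datos.foldl (fun dic registro =>
      let dept := pvKey registro "departamento"
      let asignatura := pvKey registro "asignatura"
      let dic := if dic.contains dept then dic else dic.insert dept PySem.Dict.empty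
      let inner := dic.getD dept PySem.Dict.empty
      dic.insert dept (inner.insert asignatura (inner.getD asignatura 0 + 1)))
    (PySem.Dict.empty : PySem.Dict String (PySem.Dict String Int)) = lst_datos.foldl stepA (Dmap PySem.Dict.empty) := rfl
  have hB : lst_datos.foldl (fun grupos registro =>
      let g := grupos.setdefault (pvKey registro "departamento") []
      g.insert (pvKey registro "departamento")
        (g.getD (pvKey registro "departamento") [] ++ [pvKey registro "asignatura"]))
    (PySem.Dict.empty : PySem.Dict String (List String)) = lst_datos.foldl stepB PySem.Dict.empty := rfl
  simp only [hA, hB]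
  rw [fold_comm lst_datos PySem.Dict.empty PySem.Dict.nodup_keys_empty]
  simp [Dmap, List.map_map, Function.comp]
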